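-- pv_equiv track=rewrite | github.com/Dacops/AoC | AoC-24/day07/day07.py | recurs
-- ===== SOURCE A (Python) =====
-- def recurs(past, vals, target, part2):
--     new_past = []
--     for p in past:
--         if p > target:
--             continue
--         new_past.append(p * int(vals[0]))
--         new_past.append(p + int(vals[0]))
--         if part2:
--             new_past.append(int(str(p) + vals[0]))
--
--     if len(vals[1:]) == 0:
--         return new_past
--
--     return recurs(new_past, vals[1:], target, part2)
-- ===== SOURCE B (Python) =====
-- def recurs(past, vals, target, part2):
--     # Iterative fold over vals with a flat comprehension per round (same values, same order).
--     cur = past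
--     for v in vals:
--         cur = [x for p in cur if p <= target
--                  for x in ((p * int(v), p + int(v), int(str(p) + v)) if part2 else
--                            (p * int(v), p + int(v)))]
--     return cur
-- ===== Notes on version B (the rewrite author's own statement) =====
-- stated objective: alternative
-- what changed: Replaced A's tail recursion over the suffix of vals (with an inner append loop building new_past) by a single iterative fold over vals whose per-round step is one flat filter/flatten comprehension producing the same values in the same order.
-- outside the precondition, e.g. on recurs([5], [], 1, False): A returns [], B returns [5]; on recurs([1], ['2', ' 5'], 1, True): A returns [], B returns []
import Mathlib
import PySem

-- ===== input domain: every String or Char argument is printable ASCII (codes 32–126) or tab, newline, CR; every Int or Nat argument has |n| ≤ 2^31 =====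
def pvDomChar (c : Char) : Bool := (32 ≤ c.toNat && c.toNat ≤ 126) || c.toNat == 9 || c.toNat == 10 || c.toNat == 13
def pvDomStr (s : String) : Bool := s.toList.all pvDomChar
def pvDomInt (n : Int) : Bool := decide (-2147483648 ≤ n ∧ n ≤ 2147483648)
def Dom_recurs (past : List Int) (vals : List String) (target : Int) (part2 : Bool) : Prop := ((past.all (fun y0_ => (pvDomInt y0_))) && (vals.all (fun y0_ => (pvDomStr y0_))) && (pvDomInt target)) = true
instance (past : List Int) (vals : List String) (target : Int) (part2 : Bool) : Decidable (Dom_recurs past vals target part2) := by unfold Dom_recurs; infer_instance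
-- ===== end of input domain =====

-- B replaces A's tail recursion over the suffix of vals by an iterative fold over vals whose
-- per-round step is one flat filter/flatten comprehension (same values, same order): alternative decomposition, same cost.


-- ===== PORT A =====
def recurs (past : List Int) (vals : List String) (target : Int) (part2 : Bool) : List Int :=
  match vals with
  | [] =>
    -- vals empty: the loop either appends nothing (new_past = []) or Python raises IndexError
    -- at vals[0]; excluded by Pre_recurs.
    []
  | v :: rest =>
    let new_past := past.foldl (fun acc p =>
      if p > target then acc
      else
        let acc := acc ++ [p * (PySem.Int.ofStr? v).getD 0]     -- int(vals[0]); none = ValueError, outside Pre_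
        let acc := acc ++ [p + (PySem.Int.ofStr? v).getD 0]
        if part2 then acc ++ [(PySem.Int.ofStr? (PySem.Int.toStr p ++ v)).getD 0] else acc) []
    if rest.length == 0 then new_past
    else recurs new_past rest target part2

-- ===== PORT B =====
def recurs_alt (past : List Int) (vals : List String) (target : Int) (part2 : Bool) : List Int :=
  vals.foldl (fun cur v =>
    cur.flatMap (fun p =>                                        -- int(…) : none = ValueError, outside Pre_
      if p ≤ target then
        if part2 then [p * (PySem.Int.ofStr? v).getD 0, p + (PySem.Int.ofStr? v).getD 0,
                       (PySem.Int.ofStr? (PySem.Int.toStr p ++ v)).getD 0]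
        else [p * (PySem.Int.ofStr? v).getD 0, p + (PySem.Int.ofStr? v).getD 0]
      else [])) past

-- ===== PRECONDITION & SPEC =====
-- Pre_ excludes: empty vals with nonempty past (A returns its leftover [] or raises IndexError at
-- vals[0], both accidents; B's pass-through of past is as defensible); and runs where int() may raise
-- ValueError: a string int() cannot parse reached with some p ≤ target, or for part2 a string not of
-- the shape digits/underscores-then-trailing-whitespace (int(str(p) + v) may then raise depending on
-- which p values are reached).
def Pre_recurs (past : List Int) (vals : List String) (target : Int) (part2 : Bool) : Prop :=
  past = [] ∨
  (vals ≠ [] ∧ ∀ p ∈ past, target < p) ∨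
  (vals ≠ [] ∧ (∀ v ∈ vals, (PySem.Int.ofStr? v).isSome = true) ∧
    (part2 = true → ∀ v ∈ vals, (v.toList.headD ' ').isDigit = true ∧
      ((v.toList.dropWhile (fun c => c.isDigit || c == '_')).all (fun c => c.isWhitespace) = true)))
instance (past : List Int) (vals : List String) (target : Int) (part2 : Bool) : Decidable (Pre_recurs past vals target part2) := by unfold Pre_recurs; infer_instance

def pvWitness_recurs : List Int × List String × Int × Bool := ([1, 5], ["3", "12"], 100, true)

def Spec_recurs (past : List Int) (vals : List String) (target : Int) (part2 : Bool) (out : List Int) : Prop := out = recurs_alt past vals target part2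
instance (past : List Int) (vals : List String) (target : Int) (part2 : Bool) (out : List Int) : Decidable (Spec_recurs past vals target part2 out) := by unfold Spec_recurs; infer_instance

-- ===== CLAIM (what is proved, stated in full; the proofs are below) =====
def Claim_equal_recurs : Prop := ∀ (past : List Int) (vals : List String) (target : Int) (part2 : Bool), Dom_recurs past vals target part2 → Pre_recurs past vals target part2 → Spec_recurs past vals target part2 (recurs past vals target part2)

-- ===== LEMMAS AND PROOFS =====

-- B's per-round step, named for the proofs.
def stepB (target : Int) (part2 : Bool) (cur : List Int) (v : String) : List Int :=
  cur.flatMap (fun p =>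
    if p ≤ target then
      if part2 then [p * (PySem.Int.ofStr? v).getD 0, p + (PySem.Int.ofStr? v).getD 0,
                     (PySem.Int.ofStr? (PySem.Int.toStr p ++ v)).getD 0]
      else [p * (PySem.Int.ofStr? v).getD 0, p + (PySem.Int.ofStr? v).getD 0]
    else [])

theorem recurs_alt_eq_foldl (past : List Int) (vals : List String) (target : Int) (part2 : Bool) :
    recurs_alt past vals target part2 = vals.foldl (stepB target part2) past := rfl

-- A's inner append loop equals B's flatMap, with the accumulator generalized.
theorem inner_eq (target : Int) (part2 : Bool) (v : String) (past : List Int) : ∀ acc : List Int,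
    past.foldl (fun acc p =>
      if p > target then acc
      else
        let acc := acc ++ [p * (PySem.Int.ofStr? v).getD 0]
        let acc := acc ++ [p + (PySem.Int.ofStr? v).getD 0]
        if part2 then acc ++ [(PySem.Int.ofStr? (PySem.Int.toStr p ++ v)).getD 0] else acc) acc
      = acc ++ stepB target part2 past v := by
  induction past with
  | nil => intro acc; simp [stepB]
  | cons p ps ih =>
    intro acc
    rw [List.foldl_cons, ih]
    simp only [stepB, List.flatMap_cons]
    by_cases hgt : p > target
    · have hle : ¬ p ≤ target := by omega
      simp [hgt, hle]
    · have hle : p ≤ target := by omega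
      cases part2 <;> simp [hgt, hle]

theorem recurs_eq_alt (vals : List String) : ∀ (past : List Int) (target : Int) (part2 : Bool),
    vals ≠ [] → recurs past vals target part2 = recurs_alt past vals target part2 := by
  induction vals with
  | nil => intro _ _ _ h; exact absurd rfl h
  | cons v rest ih =>
    intro past target part2 _
    rw [recurs_alt_eq_foldl, List.foldl_cons]
    show (if rest.length == 0 then _ else recurs _ rest target part2) = _
    rw [inner_eq target part2 v past []]
    cases rest with
    | nil => simp
    | cons r rs =>
      simp only [List.length_cons, List.nil_append]
      rw [if_neg (by simp)]
      rw [ih _ target part2 (by simp), recurs_alt_eq_foldl]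

-- ===== VERDICT (by name: the statement is the Claim_ definition above) =====
theorem recurs_alt_nil_past (vals : List String) (target : Int) (part2 : Bool) :
    recurs_alt [] vals target part2 = [] := by
  rw [recurs_alt_eq_foldl]
  induction vals with
  | nil => rfl
  | cons v rest ih => simpa [stepB] using ih

theorem recurs_nil_past (vals : List String) (target : Int) (part2 : Bool) :
    recurs [] vals target part2 = [] := by
  induction vals with
  | nil => rfl
  | cons v rest ih =>
    show (if rest.length == 0 then _ else recurs _ rest target part2) = []
    simp only [List.foldl_nil]
    split <;> simp [ih]

theorem recurs_spec : Claim_equal_recurs := by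
  intro past vals target part2 _ hpre
  unfold Spec_recurs
  cases vals with
  | nil =>
    -- Pre_ forces past = [] here; both programs yield [].
    have hp : past = [] := by
      rcases hpre with h | ⟨h, _⟩ | ⟨h, _⟩
      · exact h
      all_goals exact absurd rfl h
    subst hp
    rw [recurs_nil_past, recurs_alt_nil_past]
  | cons v rest =>
    exact recurs_eq_alt (v :: rest) past target part2 (by simp)
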